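-- pv_equiv track=rewrite | github.com/aapires/analisador-auditoria | 5porques-interativo/app.py | _parsear_passo
-- ===== SOURCE A (Python) =====
-- def _parsear_passo(texto, n):
--     p = r = ""
--     for linha in texto.splitlines():
--         l = _strip_md(linha)
--         lu = l.upper()
--         if lu.startswith(f"P{n}_PERGUNTA:"):
--             v = l[len(f"P{n}_PERGUNTA:"):].strip()
--             p = "" if v.upper().startswith("VAZIO") else v
--         elif lu.startswith(f"P{n}_RESPOSTA:"):
--             v = l[len(f"P{n}_RESPOSTA:"):].strip()
--             r = "" if v.upper().startswith("VAZIO") else v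
--     return p, r
--
-- def _strip_md(text):
--     """Remove marcadores markdown para não quebrar o parser."""
--     return text.replace("**", "").replace("*", "").strip()
-- ===== SOURCE B (Python) =====
-- def _strip_md(text):
--     """Remove marcadores markdown para não quebrar o parser."""
--     return text.replace("**", "").replace("*", "").strip()
--
-- def _extrair_campo(texto, n, rotulo):
--     pref = f"P{n}_{rotulo}:"
--     valor = ""
--     for linha in texto.splitlines():
--         l = _strip_md(linha)
--         if l.upper().startswith(pref):
--             v = l[len(pref):].strip()
--             valor = "" if v.upper().startswith("VAZIO") else v
--     return valor
--
-- def _parsear_passo(texto, n):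
--     return _extrair_campo(texto, n, "PERGUNTA"), _extrair_campo(texto, n, "RESPOSTA")
-- ===== Notes on version B (the rewrite author's own statement) =====
-- stated objective: simpler
-- what changed: Replaced the single combined if/elif scan that threads a (pergunta, resposta) pair through one loop with a reusable one-field helper _extrair_campo(texto, n, rotulo) that scans for a single label (last match wins, same VAZIO and markdown-stripping rules), applied twice.
import Mathlib
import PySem

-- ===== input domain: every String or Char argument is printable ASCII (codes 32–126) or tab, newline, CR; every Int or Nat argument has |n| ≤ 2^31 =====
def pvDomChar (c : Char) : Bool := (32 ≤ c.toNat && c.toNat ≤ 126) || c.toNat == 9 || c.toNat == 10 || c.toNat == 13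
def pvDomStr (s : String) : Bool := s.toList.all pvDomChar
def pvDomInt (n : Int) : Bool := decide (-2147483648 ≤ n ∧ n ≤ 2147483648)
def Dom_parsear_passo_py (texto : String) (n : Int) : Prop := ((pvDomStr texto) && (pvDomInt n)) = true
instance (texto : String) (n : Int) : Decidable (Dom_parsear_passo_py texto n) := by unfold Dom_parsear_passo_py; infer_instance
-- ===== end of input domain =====

-- B factors the combined two-field scan into a reusable one-field helper applied twice (objective: simpler decomposition); return values agree everywhere.

-- ===== PORT A =====
-- _strip_md, shared same-module helper of both Pythons
def stripMd (text : String) : String :=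
  PySem.Str.strip (PySem.Str.replace (PySem.Str.replace text "**" "") "*" "")

def parsear_passo_py (texto : String) (n : Int) : String × String :=
  (PySem.Str.splitlines texto).foldl
    (fun (st : String × String) linha =>
      let l := stripMd linha
      let lu := PySem.Str.upper l
      if PySem.Str.startswith lu ("P" ++ PySem.Int.toStr n ++ "_PERGUNTA:") then
        let v := PySem.Str.strip (PySem.Str.slice l
          (some ((PySem.Str.len ("P" ++ PySem.Int.toStr n ++ "_PERGUNTA:") : Int))) none)
        (if PySem.Str.startswith (PySem.Str.upper v) "VAZIO" then "" else v, st.2)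
      else if PySem.Str.startswith lu ("P" ++ PySem.Int.toStr n ++ "_RESPOSTA:") then
        let v := PySem.Str.strip (PySem.Str.slice l
          (some ((PySem.Str.len ("P" ++ PySem.Int.toStr n ++ "_RESPOSTA:") : Int))) none)
        (st.1, if PySem.Str.startswith (PySem.Str.upper v) "VAZIO" then "" else v)
      else st)
    ("", "")

-- ===== PORT B =====
-- _extrair_campo: one scan for one field, last match wins
def extrairCampo (texto : String) (n : Int) (rotulo : String) : String :=
  (PySem.Str.splitlines texto).foldl
    (fun valor linha =>
      let l := stripMd linha
      if PySem.Str.startswith (PySem.Str.upper l) ("P" ++ PySem.Int.toStr n ++ "_" ++ rotulo ++ ":") then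
        let v := PySem.Str.strip (PySem.Str.slice l
          (some ((PySem.Str.len ("P" ++ PySem.Int.toStr n ++ "_" ++ rotulo ++ ":") : Int))) none)
        if PySem.Str.startswith (PySem.Str.upper v) "VAZIO" then "" else v
      else valor)
    ""

def parsear_passo_py_alt (texto : String) (n : Int) : String × String :=
  (extrairCampo texto n "PERGUNTA", extrairCampo texto n "RESPOSTA")

-- ===== PRECONDITION & SPEC =====
def Spec_parsear_passo_py (texto : String) (n : Int) (out : String × String) : Prop := out = parsear_passo_py_alt texto n
instance (texto : String) (n : Int) (out : String × String) : Decidable (Spec_parsear_passo_py texto n out) := by unfold Spec_parsear_passo_py; infer_instance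

-- ===== CLAIM (what is proved, stated in full; the proofs are below) =====
def Claim_equal_parsear_passo_py : Prop := ∀ (texto : String) (n : Int), Dom_parsear_passo_py texto n → Spec_parsear_passo_py texto n (parsear_passo_py texto n)

-- ===== LEMMAS AND PROOFS =====

-- B's f"P{n}_{rotulo}:" instantiated at the two labels equals A's literal prefix strings.
lemma prefP_eq (t : String) : "P" ++ t ++ "_" ++ "PERGUNTA" ++ ":" = "P" ++ t ++ "_PERGUNTA:" := by
  simp [String.append_assoc]

lemma prefR_eq (t : String) : "P" ++ t ++ "_" ++ "RESPOSTA" ++ ":" = "P" ++ t ++ "_RESPOSTA:" := by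
  simp [String.append_assoc]

-- a line cannot start with both the PERGUNTA and the RESPOSTA prefix (same length, different text)
lemma not_both_prefixes (t lu : String)
    (hP : PySem.Str.startswith lu ("P" ++ t ++ "_PERGUNTA:") = true)
    (hR : PySem.Str.startswith lu ("P" ++ t ++ "_RESPOSTA:") = true) : False := by
  rw [PySem.Str.startswith_eq, PySem.Chars.startswith_iff] at hP hR
  simp only [String.toList_append] at hP hR
  obtain ⟨u, hu⟩ := hP
  obtain ⟨w, hw⟩ := hR
  rw [← hu] at hw
  simp only [List.append_assoc] at hw
  have h3 := List.append_cancel_left (List.append_cancel_left hw)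
  have h4 : "_RESPOSTA:".toList = "_PERGUNTA:".toList :=
    (List.append_inj h3 (by simp)).1
  exact absurd h4 (by simp)

-- a fold over a pair whose step acts componentwise splits into two folds
lemma pair_foldl {σ τ ι : Type} (F : σ × τ → ι → σ × τ) (f : σ → ι → σ) (g : τ → ι → τ)
    (h : ∀ s t x, F (s, t) x = (f s x, g t x)) :
    ∀ (xs : List ι) (s : σ) (t : τ), xs.foldl F (s, t) = (xs.foldl f s, xs.foldl g t) := by
  intro xs
  induction xs with
  | nil => intro s t; rfl
  | cons x xs ih => intro s t; simp [List.foldl, h s t x, ih]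

lemma main_eq (texto : String) (n : Int) :
    parsear_passo_py texto n = parsear_passo_py_alt texto n := by
  unfold parsear_passo_py parsear_passo_py_alt extrairCampo
  simp only [prefP_eq, prefR_eq]
  refine pair_foldl _ _ _ ?_ _ _ _
  intro s t x
  by_cases h1 : PySem.Str.startswith (PySem.Str.upper (stripMd x))
      ("P" ++ PySem.Int.toStr n ++ "_PERGUNTA:") = true
  · have h2 : ¬ PySem.Str.startswith (PySem.Str.upper (stripMd x))
        ("P" ++ PySem.Int.toStr n ++ "_RESPOSTA:") = true :=
      fun h' => not_both_prefixes _ _ h1 h'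
    rw [if_pos h1, if_pos h1, if_neg h2]
  · rw [if_neg h1, if_neg h1]
    by_cases h2 : PySem.Str.startswith (PySem.Str.upper (stripMd x))
        ("P" ++ PySem.Int.toStr n ++ "_RESPOSTA:") = true
    · rw [if_pos h2, if_pos h2]
    · rw [if_neg h2, if_neg h2]

-- ===== VERDICT (by name: the statement is the Claim_ definition above) =====
theorem parsear_passo_py_spec : Claim_equal_parsear_passo_py := by
  intro texto n _
  unfold Spec_parsear_passo_py
  exact main_eq texto n
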